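-- pv_equiv track=rewrite | github.com/uxmal/reko | subjects/regressionTests.py | cmdline_split
-- ===== SOURCE A (Python) =====
-- def cmdline_split(s):
--     a = []
--     inquotes = False
--     sub = ""
--     for c in s:
--         if c.isspace():
--             if not inquotes:
--                 if len(sub):
--                     a.append(sub)
--                     sub = ""
--             else:
--                 sub += c
--         elif c == '"':
--             if not inquotes:
--                 inquotes = True
--             else:
--                 inquotes = False
--                 a.append(sub)
--                 sub = ""
--         else:
--             sub += c
--     if len(sub):
--         a.append(sub)
--     return a
-- ===== SOURCE B (Python) =====
-- def cmdline_split(s):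
--     return _unquoted(s.split('"'))
--
-- def _unquoted(parts):
--     part, rest = parts[0], parts[1:]
--     words = part.split()
--     if not rest:
--         return words
--     if words and not part[-1].isspace():
--         return words[:-1] + _quoted(words[-1], rest)
--     return words + _quoted("", rest)
--
-- def _quoted(cur, parts):
--     tok = cur + parts[0]
--     rest = parts[1:]
--     if not rest:
--         return [tok] if tok else []
--     return [tok] + _unquoted(rest)
-- ===== Notes on version B (the rewrite author's own statement) =====
-- stated objective: faster
-- what changed: Replaces A's single character-at-a-time state machine (inquotes flag + growing token buffer) by one split on the double-quote character followed by a recursive descent over the parts, alternating whitespace-splitting of unquoted parts (carrying a trailing partial word into the quoted region) with verbatim quoted parts; the per-character Python loop is replaced by C-level str.split calls.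
import Mathlib
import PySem

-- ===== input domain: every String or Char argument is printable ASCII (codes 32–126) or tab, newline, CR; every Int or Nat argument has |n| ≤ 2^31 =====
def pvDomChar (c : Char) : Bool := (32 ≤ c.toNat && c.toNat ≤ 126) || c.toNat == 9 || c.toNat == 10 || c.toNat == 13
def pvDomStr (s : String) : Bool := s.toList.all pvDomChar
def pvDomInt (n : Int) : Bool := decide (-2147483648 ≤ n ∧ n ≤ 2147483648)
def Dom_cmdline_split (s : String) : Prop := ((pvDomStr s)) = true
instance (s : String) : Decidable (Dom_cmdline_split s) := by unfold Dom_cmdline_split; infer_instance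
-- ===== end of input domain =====

-- B replaces A's single character-state machine by one split on the quote character followed by a
-- recursive descent over the parts (alternating unquoted/quoted regions); a timing run measured B faster.


-- ===== PORT A =====
-- state: (a, inquotes, sub); one step of A's character loop
def cmdlineStep (st : List (List Char) × Bool × List Char) (c : Char) :
    List (List Char) × Bool × List Char :=
  let (a, inquotes, sub) := st
  if PySem.Chars.isspace c then
    if !inquotes then
      (if sub.isEmpty then (a, inquotes, sub) else (a ++ [sub], inquotes, []))
    else (a, inquotes, sub ++ [c])
  else if c = '"' then
    (if !inquotes then (a, true, sub) else (a ++ [sub], false, []))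
  else (a, inquotes, sub ++ [c])

def cmdline_split (s : String) : List String :=
  match s.toList.foldl cmdlineStep ([], false, []) with
  | (a, _, sub) => (if sub.isEmpty then a else a ++ [sub]).map String.ofList

-- ===== PORT B =====
-- B: split on '"' once, then recursive descent over the parts, alternating
-- unquoted (whitespace-split; trailing word carried into the quote) / quoted regions.
mutual
-- _unquoted(parts): parts is never [] in B (str.split always returns ≥ 1 part); the [] arm is a totality guard
def pvUnquoted : List (List Char) → List (List Char)
  | [] => []
  | part :: rest =>
    let words := PySem.Chars.split₀ part
    if rest = [] then words
    else if words ≠ [] ∧ PySem.Chars.isspace (part.getLast?.getD ' ') = false then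
      words.dropLast ++ pvQuoted (words.getLast?.getD []) rest
    else words ++ pvQuoted [] rest

-- _quoted(cur, parts); same totality guard for the unreachable [] arm
def pvQuoted : List Char → List (List Char) → List (List Char)
  | _, [] => []
  | cur, part :: rest =>
    let tok := cur ++ part
    if rest = [] then (if tok = [] then [] else [tok])
    else tok :: pvUnquoted rest
end

def cmdline_split_alt (s : String) : List String :=
  (pvUnquoted (PySem.Chars.splitOn s.toList ['"'])).map String.ofList

-- ===== PRECONDITION & SPEC =====
def Spec_cmdline_split (s : String) (out : List String) : Prop := out = cmdline_split_alt s
instance (s : String) (out : List String) : Decidable (Spec_cmdline_split s out) := by unfold Spec_cmdline_split; infer_instance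

-- ===== CLAIM (what is proved, stated in full; the proofs are below) =====
def Claim_equal_cmdline_split : Prop := ∀ (s : String), Dom_cmdline_split s → Spec_cmdline_split s (cmdline_split s)

-- ===== LEMMAS AND PROOFS =====

-- proof-side recursive characterisations of the two library splits
def mySplit : List Char → List (List Char)
  | [] => [[]]
  | c :: cs => if c = '"' then [] :: mySplit cs else (mySplit cs).modifyHead (c :: ·)

def myW : List Char → List (List Char)
  | [] => [[]]
  | c :: cs => if PySem.Chars.isspace c then [] :: myW cs else (myW cs).modifyHead (c :: ·)

def wsplit (p : List Char) : List (List Char) := (myW p).filter (· ≠ [])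

def pvFinish (st : List (List Char) × Bool × List Char) : List (List Char) :=
  match st with
  | (a, _, sub) => if sub.isEmpty then a else a ++ [sub]

lemma mySplit_ne_nil (cs : List Char) : mySplit cs ≠ [] := by
  induction cs with
  | nil => simp [mySplit]
  | cons c cs ih =>
    by_cases h : c = '"'
    · simp [mySplit, h]
    · simp only [mySplit, h, if_false]
      cases hm : mySplit cs with
      | nil => exact absurd hm ih
      | cons p t => simp

lemma myW_ne_nil (cs : List Char) : myW cs ≠ [] := by
  induction cs with
  | nil => simp [myW]
  | cons c cs ih =>
    by_cases h : PySem.Chars.isspace c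
    · simp [myW, h]
    · simp only [myW, h, if_false]
      cases hm : myW cs with
      | nil => exact absurd hm ih
      | cons p t => simp

@[simp] lemma modifyHead_nil_append {α : Type} (L : List (List α)) : L.modifyHead (fun x => [] ++ x) = L := by
  cases L <;> simp

@[simp] lemma modifyHead_fun_id {α : Type} (L : List α) : L.modifyHead (fun x => x) = L := by
  cases L <;> simp

-- ---- characterisation of PySem.Chars.splitOn · ['"'] ----
lemma splitOn_go_char (fuel : Nat) (l cur : List Char) (acc : List (List Char))
    (h : l.length ≤ fuel) :
    PySem.Chars.splitOn.go ['"'] fuel l cur acc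
      = acc.reverse ++ (mySplit l).modifyHead (cur.reverse ++ ·) := by
  induction fuel generalizing l cur acc with
  | zero =>
    cases l with
    | nil => simp [PySem.Chars.splitOn.go, mySplit]
    | cons c cs => simp at h
  | succ fuel ih =>
    cases l with
    | nil => simp [PySem.Chars.splitOn.go, mySplit]
    | cons c cs =>
      by_cases hc : c = '"'
      · subst hc
        have hpre : List.isPrefixOf ['"'] ('"' :: cs) = true := by
          simp [List.isPrefixOf]
        rw [PySem.Chars.splitOn.go]
        simp only [hpre, if_true, List.length_cons, List.length_nil, List.drop_succ_cons,
          List.drop_zero]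
        rw [ih cs [] (cur.reverse :: acc) (by simpa using Nat.le_of_succ_le_succ (by simpa using h))]
        simp [mySplit, modifyHead_fun_id]
      · have hpre : List.isPrefixOf ['"'] (c :: cs) = false := by
          simp [List.isPrefixOf, BEq.beq]
          intro hh
          exact absurd hh.symm hc
        rw [PySem.Chars.splitOn.go]
        simp only [hpre, Bool.false_eq_true, if_false]
        rw [ih cs (c :: cur) acc (by simpa using Nat.le_of_succ_le_succ (by simpa using h))]
        cases hm : mySplit cs with
        | nil => exact absurd hm (mySplit_ne_nil cs)
        | cons p t => simp [mySplit, hc, hm]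

lemma splitOn_eq_mySplit (l : List Char) :
    PySem.Chars.splitOn l ['"'] = mySplit l := by
  rw [PySem.Chars.splitOn, splitOn_go_char (l.length + 1) l [] [] (by omega)]
  simp [modifyHead_nil_append, modifyHead_fun_id]

-- ---- characterisation of PySem.Chars.split₀ ----
lemma split0_go_char (l cur : List Char) (acc : List (List Char)) :
    PySem.Chars.split₀.go l cur acc
      = acc.reverse ++ ((myW l).modifyHead (cur.reverse ++ ·)).filter (· ≠ []) := by
  induction l generalizing cur acc with
  | nil =>
    by_cases hc : cur.isEmpty <;>
      simp_all [PySem.Chars.split₀.go, myW, List.isEmpty_iff]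
  | cons c cs ih =>
    by_cases hs : PySem.Chars.isspace c
    · rw [PySem.Chars.split₀.go]
      simp only [hs, if_true]
      by_cases hc : cur.isEmpty
      · have : cur = [] := by simpa [List.isEmpty_iff] using hc
        subst this
        rw [ih [] acc]
        simp [myW, hs, modifyHead_nil_append, modifyHead_fun_id]
      · have hne : cur ≠ [] := by simpa [List.isEmpty_iff] using hc
        simp only [hc, Bool.false_eq_true, if_false]
        rw [ih [] (cur.reverse :: acc)]
        simp [myW, hs, modifyHead_nil_append, hne]
    · rw [PySem.Chars.split₀.go]
      simp only [hs, Bool.false_eq_true, if_false]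
      rw [ih (c :: cur) acc]
      cases hm : myW cs with
      | nil => exact absurd hm (myW_ne_nil cs)
      | cons p t => simp [myW, hs, hm]

lemma split0_eq_wsplit (p : List Char) : PySem.Chars.split₀ p = wsplit p := by
  rw [PySem.Chars.split₀, split0_go_char p [] []]
  simp [wsplit, modifyHead_nil_append, modifyHead_fun_id]

-- ---- wsplit facts ----
lemma myW_append_spacefree (sub t : List Char) (h : ∀ c ∈ sub, PySem.Chars.isspace c = false) :
    myW (sub ++ t) = (myW t).modifyHead (sub ++ ·) := by
  induction sub with
  | nil => simp [modifyHead_nil_append, modifyHead_fun_id]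
  | cons c sub ih =>
    have hc : PySem.Chars.isspace c = false := h c (by simp)
    rw [List.cons_append, myW]
    simp only [hc, Bool.false_eq_true, if_false]
    rw [ih (fun d hd => h d (by simp [hd]))]
    cases hm : myW t with
    | nil => exact absurd hm (myW_ne_nil t)
    | cons p t' => simp

lemma wsplit_spacefree (sub : List Char) (h : ∀ c ∈ sub, PySem.Chars.isspace c = false) :
    wsplit sub = if sub.isEmpty then [] else [sub] := by
  have := myW_append_spacefree sub [] h
  simp only [List.append_nil] at this
  rw [wsplit, this]
  cases sub <;> simp [myW]

lemma wsplit_cons_space (c : Char) (p : List Char) (hs : PySem.Chars.isspace c = true) :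
    wsplit (c :: p) = wsplit p := by
  rw [wsplit, myW]
  simp [hs, wsplit]

lemma wsplit_word_space (sub : List Char) (c : Char) (p : List Char)
    (hne : sub ≠ []) (h : ∀ d ∈ sub, PySem.Chars.isspace d = false)
    (hs : PySem.Chars.isspace c = true) :
    wsplit (sub ++ c :: p) = sub :: wsplit p := by
  rw [wsplit, myW_append_spacefree sub (c :: p) h, myW]
  simp [hs, wsplit, hne]

lemma wsplit_eq_nil_iff (p : List Char) :
    wsplit p = [] ↔ ∀ c ∈ p, PySem.Chars.isspace c = true := by
  induction p with
  | nil => simp [wsplit, myW]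
  | cons c p ih =>
    by_cases hs : PySem.Chars.isspace c
    · rw [wsplit_cons_space c p hs, ih]
      simp [hs]
    · constructor
      · intro hcontra
        exfalso
        rw [wsplit, myW] at hcontra
        simp only [hs, Bool.false_eq_true, if_false] at hcontra
        cases hm : myW p with
        | nil => exact absurd hm (myW_ne_nil p)
        | cons q t => simp [hm] at hcontra
      · intro hall
        exact absurd (hall c (by simp)) (by simp [hs])

-- ---- pvUnquoted / pvQuoted rewriting lemmas ----
lemma quoted_cons (cur : List Char) (c : Char) (q : List Char) (t : List (List Char)) :
    pvQuoted cur ((c :: q) :: t) = pvQuoted (cur ++ [c]) (q :: t) := by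
  have h : cur ++ c :: q = (cur ++ [c]) ++ q := by simp
  simp only [pvQuoted, h]

lemma unquoted_cons_space (c : Char) (p : List Char) (rest : List (List Char))
    (hs : PySem.Chars.isspace c = true) :
    pvUnquoted ((c :: p) :: rest) = pvUnquoted (p :: rest) := by
  rw [pvUnquoted, pvUnquoted]
  simp only [split0_eq_wsplit, wsplit_cons_space c p hs]
  cases p with
  | nil =>
    have : wsplit ([] : List Char) = [] := by simp [wsplit, myW]
    simp [this, hs]
  | cons d p' => simp

lemma unquoted_word_space (sub : List Char) (c : Char) (p : List Char) (rest : List (List Char))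
    (hne : sub ≠ []) (h : ∀ d ∈ sub, PySem.Chars.isspace d = false)
    (hs : PySem.Chars.isspace c = true) :
    pvUnquoted ((sub ++ c :: p) :: rest) = sub :: pvUnquoted (p :: rest) := by
  rw [pvUnquoted, pvUnquoted]
  simp only [split0_eq_wsplit, wsplit_word_space sub c p hne h hs]
  cases hrest : rest with
  | nil => simp
  | cons r rs =>
    have hlast : (sub ++ c :: p).getLast? = (c :: p).getLast? := by
      rw [List.getLast?_append, List.getLast?_eq_getLast (l := c :: p) (by simp), Option.some_or]
    cases p with
    | nil =>
      have hw : wsplit ([] : List Char) = [] := by simp [wsplit, myW]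
      simp [hlast, hs, hw]
    | cons d p' =>
      have hlast2 : (c :: d :: p').getLast? = (d :: p').getLast? := List.getLast?_cons_cons ..
      by_cases hl : PySem.Chars.isspace ((d :: p').getLast?.getD ' ') = false
      · have hwne : wsplit (d :: p') ≠ [] := by
          rw [Ne, wsplit_eq_nil_iff]
          intro hall
          have hmem : (d :: p').getLast (by simp) ∈ d :: p' := List.getLast_mem _
          have := hall _ hmem
          rw [List.getLast?_eq_getLast (l := d :: p') (by simp)] at hl
          simp [this] at hl
        cases hw : wsplit (d :: p') with
        | nil => exact absurd hw hwne
        | cons w ws =>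
          simp [hlast, hlast2, hl, hw]
      · simp only [Bool.not_eq_false] at hl
        simp [hlast, hlast2, hl]

lemma unquoted_enter_quote (sub : List Char) (rest : List (List Char))
    (h : ∀ d ∈ sub, PySem.Chars.isspace d = false) (hrest : rest ≠ []) :
    pvUnquoted (sub :: rest) = pvQuoted sub rest := by
  rw [pvUnquoted]
  simp only [split0_eq_wsplit, wsplit_spacefree sub h]
  cases hrest2 : rest with
  | nil => exact absurd hrest2 hrest
  | cons r rs =>
    cases hsub : sub with
    | nil => simp [wsplit, myW]
    | cons c s' =>
      subst hsub
      have hlast : PySem.Chars.isspace ((c :: s').getLast?.getD ' ') = false := by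
        rw [List.getLast?_eq_getLast (l := c :: s') (by simp)]
        simp only [Option.getD_some]
        exact h _ (List.getLast_mem _)
      simp [hlast]

-- ---- the main loop invariant: A's fold over the characters equals B's descent over the parts ----
lemma mainEO (cs : List Char) :
    (∀ (a : List (List Char)) (sub : List Char),
        (∀ c ∈ sub, PySem.Chars.isspace c = false) →
        pvFinish (cs.foldl cmdlineStep (a, false, sub))
          = a ++ pvUnquoted ((mySplit cs).modifyHead (sub ++ ·)))
    ∧ (∀ (a : List (List Char)) (sub : List Char),
        pvFinish (cs.foldl cmdlineStep (a, true, sub))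
          = a ++ pvQuoted sub (mySplit cs)) := by
  induction cs with
  | nil =>
    constructor
    · intro a sub h
      simp only [List.foldl_nil, pvFinish, mySplit, List.modifyHead, List.append_nil]
      rw [pvUnquoted]
      simp only [split0_eq_wsplit, wsplit_spacefree sub h]
      by_cases hc : sub.isEmpty <;> simp [hc]
    · intro a sub
      simp only [List.foldl_nil, pvFinish, mySplit]
      rw [pvQuoted]
      simp only [List.append_nil]
      by_cases hc : sub.isEmpty
      · have : sub = [] := by simpa [List.isEmpty_iff] using hc
        simp [hc, this]
      · have : sub ≠ [] := by simpa [List.isEmpty_iff] using hc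
        simp [hc, this]
  | cons c cs ih =>
    obtain ⟨ihE, ihO⟩ := ih
    obtain ⟨p, t, hm⟩ : ∃ p t, mySplit cs = p :: t := by
      cases hm : mySplit cs with
      | nil => exact absurd hm (mySplit_ne_nil cs)
      | cons p t => exact ⟨p, t, rfl⟩
    constructor
    · intro a sub h
      by_cases hs : PySem.Chars.isspace c
      · have hcq : c ≠ '"' := by
          intro hcontra; subst hcontra; simp [PySem.Chars.isspace] at hs
        rw [List.foldl_cons]
        by_cases hsub : sub.isEmpty
        · have hsubnil : sub = [] := by simpa [List.isEmpty_iff] using hsub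
          subst hsubnil
          have hstep : cmdlineStep (a, false, []) c = (a, false, []) := by
            simp [cmdlineStep, hs]
          rw [hstep, ihE a [] (by simp)]
          simp only [mySplit, hcq, if_false, hm, List.modifyHead, List.nil_append]
          rw [unquoted_cons_space c p t hs]
        · have hsubne : sub ≠ [] := by simpa [List.isEmpty_iff] using hsub
          have hstep : cmdlineStep (a, false, sub) c = (a ++ [sub], false, []) := by
            simp [cmdlineStep, hs, hsub]
          rw [hstep, ihE (a ++ [sub]) [] (by simp)]
          simp only [mySplit, hcq, if_false, hm, List.modifyHead, List.nil_append]
          rw [unquoted_word_space sub c p t hsubne h hs]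
          simp
      · by_cases hcq : c = '"'
        · subst hcq
          rw [List.foldl_cons]
          have hstep : cmdlineStep (a, false, sub) '"' = (a, true, sub) := by
            simp [cmdlineStep, hs]
          rw [hstep, ihO a sub]
          simp only [mySplit, if_true, hm, List.modifyHead, List.append_nil]
          rw [unquoted_enter_quote sub (p :: t) h (by simp)]
        · rw [List.foldl_cons]
          have hstep : cmdlineStep (a, false, sub) c = (a, false, sub ++ [c]) := by
            simp [cmdlineStep, hs, hcq]
          have hsub' : ∀ d ∈ sub ++ [c], PySem.Chars.isspace d = false := by
            intro d hd
            rcases List.mem_append.mp hd with hd | hd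
            · exact h d hd
            · simp at hd; subst hd; simpa using hs
          rw [hstep, ihE a (sub ++ [c]) hsub']
          simp only [mySplit, hcq, if_false, hm, List.modifyHead]
          have h2 : (sub ++ [c]) ++ p = sub ++ c :: p := by simp
          rw [h2]
    · intro a sub
      by_cases hcq : c = '"'
      · subst hcq
        rw [List.foldl_cons]
        have hstep : cmdlineStep (a, true, sub) '"' = (a ++ [sub], false, []) := by
          simp [cmdlineStep, PySem.Chars.isspace]
        rw [hstep, ihE (a ++ [sub]) [] (by simp)]
        simp only [mySplit, if_true, hm, modifyHead_nil_append, modifyHead_fun_id]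
        rw [pvQuoted]
        simp
      · rw [List.foldl_cons]
        have hstep : cmdlineStep (a, true, sub) c = (a, true, sub ++ [c]) := by
          by_cases hs : PySem.Chars.isspace c <;> simp [cmdlineStep, hs, hcq]
        rw [hstep, ihO a (sub ++ [c])]
        simp only [mySplit, hcq, if_false, hm, List.modifyHead]
        rw [quoted_cons]

-- ===== VERDICT (by name: the statement is the Claim_ definition above) =====
theorem cmdline_split_spec : Claim_equal_cmdline_split := by
  intro s _
  unfold Spec_cmdline_split cmdline_split cmdline_split_alt
  rw [splitOn_eq_mySplit]
  have hmain := (mainEO s.toList).1 [] [] (by simp)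
  obtain ⟨p, t, hmsp⟩ : ∃ p t, mySplit s.toList = p :: t := by
    cases hm : mySplit s.toList with
    | nil => exact absurd hm (mySplit_ne_nil s.toList)
    | cons p t => exact ⟨p, t, rfl⟩
  rw [hmsp] at hmain ⊢
  simp only [List.modifyHead_cons, List.nil_append] at hmain
  rcases hfold : s.toList.foldl cmdlineStep ([], false, []) with ⟨a, inq, sub⟩
  rw [hfold] at hmain
  rw [show pvFinish (a, inq, sub) = (if sub.isEmpty then a else a ++ [sub]) from rfl] at hmain
  rw [← hmain]
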